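-- pv_equiv track=rewrite | github.com/djole103/algo | python/round2/stockRunningProfit.py | multipleBuys
-- ===== SOURCE A (Python) =====
-- def multipleBuys(nums):
--         if len(nums) < 2:
--                 return 0
--         profit = 0
--         mx = nums[-1]
--         for i in range(len(nums) - 2, -1, -1):
--                 if nums[i] > mx:
--                         mx = nums[i]
--                 if nums[i] < mx:
--                         profit += mx - nums[i]
--         return profit
-- ===== SOURCE B (Python) =====
-- def multipleBuys(nums):
--     # Forward pass with a monotonic stack of (value, count) pairs, strictly
--     # decreasing in value from bottom to top: it run-length-encodes the
--     # suffix-maximum table of the prefix seen so far.  When x arrives, every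
--     # stacked value <= x has its positions' suffix max raised to x, so those
--     # entries are merged into x's count.  Finally profit = sum of suffix
--     # maxima (the weighted stack sum) minus sum(nums).
--     stack = []
--     for x in nums:
--         c = 1
--         while stack and stack[-1][0] <= x:
--             c += stack.pop()[1]
--         stack.append((x, c))
--     return sum(v * c for v, c in stack) - sum(nums)
-- ===== Notes on version B (the rewrite author's own statement) =====
-- stated objective: alternative
-- what changed: Replaces A's backward index loop with a running max and scalar profit accumulator by a forward single pass over a monotonic (value,count) stack that run-length-encodes the suffix-maximum table; the answer is the weighted stack sum minus sum(nums).
import Mathlib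
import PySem

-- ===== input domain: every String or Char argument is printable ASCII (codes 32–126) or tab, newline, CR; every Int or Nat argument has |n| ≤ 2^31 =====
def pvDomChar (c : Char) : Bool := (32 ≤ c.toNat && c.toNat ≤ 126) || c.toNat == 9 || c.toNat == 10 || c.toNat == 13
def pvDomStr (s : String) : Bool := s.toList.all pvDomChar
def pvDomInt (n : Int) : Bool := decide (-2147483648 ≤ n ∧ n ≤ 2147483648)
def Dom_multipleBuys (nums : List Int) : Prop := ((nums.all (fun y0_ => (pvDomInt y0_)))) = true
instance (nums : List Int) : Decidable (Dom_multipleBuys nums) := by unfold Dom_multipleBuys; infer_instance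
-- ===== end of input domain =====

-- B replaces A's backward running-max profit loop with a forward monotonic
-- (value,count)-stack run-length-encoding the suffix-max table; profit = weighted stack sum - sum(nums) (alternative, same cost).


-- ===== PORT A =====
-- literal transliteration: guard, mx = nums[-1] (in range: length ≥ 2, so pyGetD's default is never used),
-- then for i in range(len-2, -1, -1) the two branches on state (mx, profit)
def multipleBuys (nums : List Int) : Int :=
  if nums.length < 2 then 0
  else
    let st := (PySem.List.pyRange ((nums.length : Int) - 2) (-1) (-1)).foldl
      (fun (s : Int × Int) i =>
        let x := PySem.List.pyGetD nums i 0
        let mx := if x > s.1 then x else s.1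
        let profit := if x < mx then s.2 + (mx - x) else s.2
        (mx, profit))
      (PySem.List.pyGetD nums (-1) 0, 0)
    st.2

-- ===== PORT B =====
-- transliteration of Source B: the inner `while stack and stack[-1][0] <= x: c += stack.pop()[1]`
-- (stack top = list head here) becomes the structural recursion pvPop
def pvPop (x : Int) : List (Int × Int) → Int → List (Int × Int) × Int
  | [], c => ([], c)
  | (v, k) :: rest, c => if v ≤ x then pvPop x rest (c + k) else ((v, k) :: rest, c)

-- one iteration of Source B's `for x in nums` body: pop, then stack.append((x, c))
def pvPush (st : List (Int × Int)) (x : Int) : List (Int × Int) :=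
  let r := pvPop x st 1
  (x, r.2) :: r.1

def multipleBuys_alt (nums : List Int) : Int :=
  let stack := nums.foldl pvPush []
  (stack.map (fun p => p.1 * p.2)).sum - nums.sum

-- ===== PRECONDITION & SPEC =====
def Spec_multipleBuys (nums : List Int) (out : Int) : Prop := out = multipleBuys_alt nums
instance (nums : List Int) (out : Int) : Decidable (Spec_multipleBuys nums out) := by unfold Spec_multipleBuys; infer_instance

-- ===== CLAIM (what is proved, stated in full; the proofs are below) =====
def Claim_equal_multipleBuys : Prop := ∀ (nums : List Int), Dom_multipleBuys nums → Spec_multipleBuys nums (multipleBuys nums)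

-- ===== LEMMAS AND PROOFS =====

/-- running-max scan list: pvScan m t = [max m t₀, max m t₀ t₁, …] -/
def pvScan (m : Int) : List Int → List Int
  | [] => []
  | x :: xs => max m x :: pvScan (max m x) xs

/-- A's loop body, abstracted. -/
def pvStepA (s : Int × Int) (x : Int) : Int × Int :=
  let mx := if x > s.1 then x else s.1
  let profit := if x < mx then s.2 + (mx - x) else s.2
  (mx, profit)

lemma pvStepA_eq (s : Int × Int) (x : Int) :
    pvStepA s x = (max s.1 x, s.2 + (max s.1 x - x)) := by
  unfold pvStepA
  by_cases h : x > s.1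
  · simp [h, le_of_lt h]
  · rw [not_lt] at h
    rcases lt_or_eq_of_le h with h' | h'
    · simp [not_lt.mpr (le_of_lt h'), h', max_eq_left (le_of_lt h')]
    · simp [h', max_self]

/-- A's fold, value of the profit component. -/
lemma pvFoldA (t : List Int) : ∀ (m p : Int),
    (t.foldl pvStepA (m, p)).2 = p + (pvScan m t).sum - t.sum := by
  induction t with
  | nil => intro m p; simp [show pvScan m [] = [] from rfl]
  | cons x xs ih =>
    intro m p
    simp only [List.foldl_cons, pvStepA_eq, pvScan, List.sum_cons]
    rw [ih]
    ring

/-- the countdown-index fold of A equals the fold over the reversed prefix values. -/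
lemma pvRangeFold (nums : List Int) : ∀ (k : Nat) (init : Int × Int), k ≤ nums.length →
    (PySem.List.pyRange ((k : Int) - 1) (-1) (-1)).foldl
      (fun s i => pvStepA s (PySem.List.pyGetD nums i 0)) init
    = ((nums.take k).reverse).foldl pvStepA init := by
  intro k
  induction k with
  | zero =>
    intro init _
    rw [PySem.List.pyRange_neg_one_eq_nil (by norm_num)]
    simp
  | succ k ih =>
    intro init hk
    have hk' : k < nums.length := hk
    rw [show ((k + 1 : Nat) : Int) - 1 = (k : Int) by push_cast; ring]
    rw [PySem.List.pyRange_neg_one_cons (by omega)]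
    rw [List.foldl_cons, ih _ (le_of_lt hk')]
    have hget : PySem.List.pyGetD nums (k : Int) 0 = nums[k] := by
      rw [PySem.List.pyGetD_eq_getElem (i := (k : Int)) nums 0 (by positivity) (by exact_mod_cast hk')]
      simp
    have htake : nums.take (k + 1) = nums.take k ++ [nums[k]] := by
      rw [List.take_add_one]
      simp [List.getElem?_eq_getElem hk']
    rw [hget, htake, List.reverse_append, List.reverse_singleton, List.singleton_append,
      List.foldl_cons]

/-- the reversed suffix-max sequence, built forward. -/
def pvSeqStep (acc : List Int) (x : Int) : List Int := x :: acc.map (max x)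

def pvSeq (nums : List Int) : List Int := nums.foldl pvSeqStep []

lemma pvScan_map (m : Int) (t : List Int) : ∀ a, (pvScan a t).map (max m) = pvScan (max m a) t := by
  induction t with
  | nil => intro a; simp [pvScan]
  | cons x xs ih =>
    intro a
    simp only [pvScan, List.map_cons, ih (max a x)]
    rw [max_assoc]

/-- pvSeq of a reversed cons list is the prepended running-max scan. -/
lemma pvSeq_reverse (t : List Int) : ∀ m, pvSeq ((m :: t).reverse) = m :: pvScan m t := by
  induction t with
  | nil => intro m; simp [pvSeq, pvSeqStep, show pvScan m [] = [] from rfl]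
  | cons a t' ih =>
    intro m
    have : (m :: a :: t').reverse = (a :: t').reverse ++ [m] := by simp
    rw [this]
    unfold pvSeq
    rw [List.foldl_append]
    show pvSeqStep (pvSeq ((a :: t').reverse)) m = _
    rw [ih a]
    unfold pvSeqStep
    simp only [List.map_cons, pvScan_map, pvScan]

def pvExpand (st : List (Int × Int)) : List Int := st.flatMap (fun p => List.replicate p.2.toNat p.1)

lemma pvExpand_gt (x : Int) : ∀ st : List (Int × Int), (∀ p ∈ st, x < p.1) →
    (pvExpand st).map (max x) = pvExpand st := by
  intro st h
  induction st with
  | nil => simp [pvExpand]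
  | cons p rest ih =>
    simp only [pvExpand, List.flatMap_cons, List.map_append, List.map_replicate] at *
    rw [max_eq_right (le_of_lt (h p (by simp)))]
    rw [ih (fun q hq => h q (by simp [hq]))]

/-- pop specification: values/counts invariants are preserved and the expanded
    multiset is the max-x image of the old one, after peeling `c` copies of x. -/
lemma pvPop_spec (x : Int) : ∀ (st : List (Int × Int)) (c : Int),
    List.Pairwise (fun a b => a.1 < b.1) st → (∀ p ∈ st, 1 ≤ p.2) → 1 ≤ c →
    List.Pairwise (fun a b => a.1 < b.1) (pvPop x st c).1 ∧
    (∀ p ∈ (pvPop x st c).1, 1 ≤ p.2) ∧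
    (∀ p ∈ (pvPop x st c).1, x < p.1) ∧
    1 ≤ (pvPop x st c).2 ∧
    List.replicate (pvPop x st c).2.toNat x ++ pvExpand (pvPop x st c).1
      = List.replicate c.toNat x ++ (pvExpand st).map (max x) := by
  intro st
  induction st with
  | nil => intro c _ _ hc; simp [pvPop, pvExpand, hc]
  | cons p rest ih =>
    intro c hpw hcnt hc
    obtain ⟨v, k⟩ := p
    by_cases hvx : v ≤ x
    · have hk : 1 ≤ k := hcnt (v, k) (by simp)
      have := ih (c + k) (List.Pairwise.of_cons hpw)
        (fun q hq => hcnt q (by simp [hq])) (by omega)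
      simp only [pvPop, if_pos hvx]
      refine ⟨this.1, this.2.1, this.2.2.1, this.2.2.2.1, ?_⟩
      rw [this.2.2.2.2]
      simp only [pvExpand, List.flatMap_cons, List.map_append, List.map_replicate]
      rw [max_eq_left hvx]
      have : (c + k).toNat = c.toNat + k.toNat := by omega
      rw [this, List.replicate_add, List.append_assoc]
    · rw [not_le] at hvx
      simp only [pvPop, if_neg (not_le.mpr hvx)]
      refine ⟨hpw, hcnt, ?_, hc, ?_⟩
      · intro q hq
        rcases List.mem_cons.mp hq with h | h
        · rw [h]; exact hvx
        · exact lt_trans hvx ((List.pairwise_cons.mp hpw).1 q h)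
      · rw [pvExpand_gt x ((v, k) :: rest)]
        intro q hq
        rcases List.mem_cons.mp hq with h | h
        · rw [h]; exact hvx
        · exact lt_trans hvx ((List.pairwise_cons.mp hpw).1 q h)

lemma pvPush_spec (st : List (Int × Int)) (x : Int)
    (hpw : List.Pairwise (fun a b => a.1 < b.1) st) (hcnt : ∀ p ∈ st, 1 ≤ p.2) :
    List.Pairwise (fun a b => a.1 < b.1) (pvPush st x) ∧
    (∀ p ∈ pvPush st x, 1 ≤ p.2) ∧
    pvExpand (pvPush st x) = pvSeqStep (pvExpand st) x := by
  have h := pvPop_spec x st 1 hpw hcnt le_rfl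
  unfold pvPush
  refine ⟨List.pairwise_cons.mpr ⟨fun q hq => h.2.2.1 q hq, h.1⟩, ?_, ?_⟩
  · intro q hq
    rcases List.mem_cons.mp hq with hh | hh
    · rw [hh]; exact h.2.2.2.1
    · exact h.2.1 q hh
  · show pvExpand ((x, (pvPop x st 1).2) :: (pvPop x st 1).1) = _
    simp only [pvExpand, List.flatMap_cons]
    have := h.2.2.2.2
    simp only [pvExpand] at this
    rw [this]
    simp [pvSeqStep]

/-- the stack fold expands to pvSeq. -/
lemma pvFoldB (nums : List Int) : ∀ (st : List (Int × Int)),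
    List.Pairwise (fun a b => a.1 < b.1) st → (∀ p ∈ st, 1 ≤ p.2) →
    List.Pairwise (fun a b => a.1 < b.1) (nums.foldl pvPush st) ∧
    (∀ p ∈ nums.foldl pvPush st, 1 ≤ p.2) ∧
    pvExpand (nums.foldl pvPush st) = nums.foldl pvSeqStep (pvExpand st) := by
  induction nums with
  | nil => intro st h1 h2; exact ⟨h1, h2, rfl⟩
  | cons x xs ih =>
    intro st h1 h2
    have hp := pvPush_spec st x h1 h2
    have := ih (pvPush st x) hp.1 hp.2.1
    refine ⟨this.1, this.2.1, ?_⟩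
    rw [List.foldl_cons, List.foldl_cons, this.2.2, hp.2.2]

/-- weighted sum = sum of the expansion, for positive counts. -/
lemma pvWsum : ∀ (st : List (Int × Int)), (∀ p ∈ st, 1 ≤ p.2) →
    (st.map (fun p => p.1 * p.2)).sum = (pvExpand st).sum := by
  intro st
  induction st with
  | nil => simp [pvExpand]
  | cons p rest ih =>
    intro h
    obtain ⟨v, k⟩ := p
    have hk : 1 ≤ k := h (v, k) (by simp)
    simp only [pvExpand, List.flatMap_cons, List.map_cons, List.sum_cons, List.sum_append,
      List.sum_replicate]
    rw [ih (fun q hq => h q (by simp [hq]))]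
    have hks : (k.toNat • v : Int) = v * k := by
      rw [nsmul_eq_mul]
      have : (k.toNat : Int) = k := by omega
      rw [this]; ring
    rw [hks]
    rfl

/-- B's result via pvSeq. -/
lemma pvAlt_eq (nums : List Int) : multipleBuys_alt nums = (pvSeq nums).sum - nums.sum := by
  have h := pvFoldB nums [] (by simp) (by simp)
  show ((nums.foldl pvPush []).map (fun p => p.1 * p.2)).sum - nums.sum = _
  rw [pvWsum _ h.2.1, h.2.2]
  simp [pvExpand, pvSeq]

-- ===== VERDICT (by name: the statement is the Claim_ definition above) =====
theorem multipleBuys_spec : Claim_equal_multipleBuys := by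
  unfold Claim_equal_multipleBuys
  intro nums _
  unfold Spec_multipleBuys
  rw [pvAlt_eq]
  rcases hr : nums.reverse with _ | ⟨h, t⟩
  · have hnil : nums = [] := by simpa using congrArg List.reverse hr
    subst hnil; simp [multipleBuys, pvSeq]
  · have hnums : nums = t.reverse ++ [h] := by
      have := congrArg List.reverse hr; simpa using this
    have hseq : pvSeq nums = h :: pvScan h t := by
      rw [hnums, ← List.reverse_cons]; exact pvSeq_reverse t h
    rw [hseq]
    by_cases hlen : nums.length < 2
    · -- nums = [h], t = []
      have ht : t = [] := by
        subst hnums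
        rcases t with _ | ⟨a, t'⟩
        · rfl
        · simp at hlen
      subst ht
      simp [multipleBuys, hnums, pvScan]
    · -- main case: length ≥ 2
      unfold multipleBuys
      rw [if_neg hlen]
      show ((PySem.List.pyRange ((nums.length : Int) - 2) (-1) (-1)).foldl
        (fun s i => pvStepA s (PySem.List.pyGetD nums i 0))
        (PySem.List.pyGetD nums (-1) 0, 0)).2 = _
      have hlen2 : 2 ≤ nums.length := not_lt.mp hlen
      have hcast : ((nums.length : Int)) - 2 = ((nums.length - 1 : Nat) : Int) - 1 := by
        omega
      rw [hcast, pvRangeFold nums (nums.length - 1) _ (by omega)]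
      have htake : nums.take (nums.length - 1) = t.reverse := by
        rw [hnums]; simp
      have hlast : PySem.List.pyGetD nums (-1) 0 = h := by
        rw [hnums]
        simp [PySem.List.pyGetD, PySem.List.pyGet?, PySem.List.pyIdx?]
      rw [htake, hlast, List.reverse_reverse, pvFoldA]
      have hsum : nums.sum = t.sum + h := by rw [hnums]; simp
      rw [hsum]
      simp only [List.sum_cons]
      ring
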